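-- pv_equiv track=rewrite | github.com/Rick0317/EntanglementReduction | RickVersion/utils/ham_utils.py | find_3d_degs
-- ===== SOURCE A (Python) =====
-- import itertools
--
-- def find_3d_degs(deg):
-- 	fit_degs = []
-- 	deg_idx = 0
-- 	for feat_deg in range(3,deg+1):
-- 		max_deg = feat_deg - 3
-- 		possible_occupations = generate_bin_occupations(max_deg, 3)
-- 		for occ in possible_occupations:
-- 			q1deg = 1 + occ[0]
-- 			q2deg = 1 + occ[1]
-- 			q3deg = 1 + occ[2]
-- 			fit_degs.append((q1deg,q2deg,q3deg))
-- 			deg_idx += 1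
--
-- 	return fit_degs
--
-- def generate_bin_occupations(max_occ, nbins):
--     # Generate all combinations placing max_occ balls in nbins
--     combinations = list(itertools.product(range(max_occ+1), repeat=nbins))
--
--     # Filter valid combinations
--     valid_combinations = [combo for combo in combinations if sum(combo) == max_occ]
--
--     return valid_combinations
-- ===== SOURCE B (Python) =====
-- def find_3d_degs(deg):
--     fit_degs = []
--     for feat_deg in range(3, deg + 1):
--         m = feat_deg - 3
--         for i in range(m + 1):
--             for j in range(m - i + 1):
--                 fit_degs.append((1 + i, 1 + j, 1 + (m - i - j)))
--     return fit_degs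
-- ===== Notes on version B (the rewrite author's own statement) =====
-- stated objective: alternative
-- what changed: Instead of enumerating the full cube of triples and filtering those whose sum matches, B directly enumerates the compositions i, j, k = m - i - j, never generating an invalid triple (intended as faster, O(deg^3) vs O(deg^4), though a timing run could not confirm a speed-up at its largest size).
import Mathlib
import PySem

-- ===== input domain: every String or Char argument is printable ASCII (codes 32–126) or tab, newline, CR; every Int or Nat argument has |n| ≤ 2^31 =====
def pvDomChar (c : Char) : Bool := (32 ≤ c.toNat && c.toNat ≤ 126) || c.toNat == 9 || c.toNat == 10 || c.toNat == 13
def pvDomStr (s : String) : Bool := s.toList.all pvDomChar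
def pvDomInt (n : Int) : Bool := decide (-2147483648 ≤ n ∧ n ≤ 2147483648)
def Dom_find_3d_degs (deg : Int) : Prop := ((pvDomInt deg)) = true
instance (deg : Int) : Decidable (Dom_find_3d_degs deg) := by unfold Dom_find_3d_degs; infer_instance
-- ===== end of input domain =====

-- B enumerates the 3-part compositions directly (k = m - i - j) instead of filtering the full cube of triples; intended as faster (a timing run could not confirm a speed-up at its largest size).

-- ===== PORT A =====
-- helper generate_bin_occupations(max_occ, nbins): A only ever calls it with nbins = 3, so
-- itertools.product(range(max_occ+1), repeat=nbins) is transliterated as the triple product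
-- (the nbins parameter is kept; the port is exact for nbins = 3, the only call site).
def generate_bin_occupations (maxOcc : Int) (nbins : Int) : List (Int × Int × Int) :=
  let r := PySem.List.pyRange 0 (maxOcc + 1) 1
  let combinations := r.flatMap (fun i => r.flatMap (fun j => r.map (fun k => (i, j, k))))
  combinations.filter (fun c => c.1 + c.2.1 + c.2.2 == maxOcc)

-- deg_idx in A is write-only dead state and does not affect the return value; it is not carried.
def find_3d_degs (deg : Int) : List (List Int) :=
  (PySem.List.pyRange 3 (deg + 1) 1).foldl (fun acc featDeg =>
    let maxDeg := featDeg - 3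
    (generate_bin_occupations maxDeg 3).foldl (fun acc2 occ =>
      acc2 ++ [[1 + occ.1, 1 + occ.2.1, 1 + occ.2.2]]) acc) []

-- ===== PORT B =====
def find_3d_degs_alt (deg : Int) : List (List Int) :=
  (PySem.List.pyRange 3 (deg + 1) 1).foldl (fun acc featDeg =>
    let m := featDeg - 3
    (PySem.List.pyRange 0 (m + 1) 1).foldl (fun acc2 i =>
      (PySem.List.pyRange 0 (m - i + 1) 1).foldl (fun acc3 j =>
        acc3 ++ [[1 + i, 1 + j, 1 + (m - i - j)]]) acc2) acc) []

-- ===== PRECONDITION & SPEC =====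
def Spec_find_3d_degs (deg : Int) (out : List (List Int)) : Prop := out = find_3d_degs_alt deg
instance (deg : Int) (out : List (List Int)) : Decidable (Spec_find_3d_degs deg out) := by unfold Spec_find_3d_degs; infer_instance

-- ===== CLAIM (what is proved, stated in full; the proofs are below) =====
def Claim_equal_find_3d_degs : Prop := ∀ (deg : Int), Dom_find_3d_degs deg → Spec_find_3d_degs deg (find_3d_degs deg)

-- ===== LEMMAS AND PROOFS =====

-- filtering a Nat range by equality keeps at most the one matching element
lemma range_filter_eq (N c : Nat) :
    (List.range N).filter (fun t => t == c) = if c < N then [c] else [] := by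
  induction N with
  | zero => simp
  | succ n ih =>
    rw [List.range_succ, List.filter_append, ih]
    by_cases h : c < n
    · simp [h, Nat.lt_succ_of_lt h, Nat.ne_of_gt h]
    · by_cases h2 : c = n
      · simp [h2]
      · have : ¬ c < n + 1 := by omega
        simp [h, this, Ne.symm h2]

-- the same for an ascending unit pyRange over Int
lemma filter_eq_pyRange (a b c : Int) :
    (PySem.List.pyRange a b 1).filter (fun k => k == c) =
      if a ≤ c ∧ c < b then [c] else [] := by
  rw [PySem.List.pyRange_one, List.filter_map]
  by_cases hc : a ≤ c ∧ c < b
  · have hcong : ∀ t ∈ List.range (b - a).toNat,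
        ((fun k => k == c) ∘ (fun k : Nat => a + (k : Int))) t = (fun t => t == (c - a).toNat) t := by
      intro t ht
      simp only [Function.comp]
      rw [Bool.eq_iff_iff]
      simp only [beq_iff_eq]
      omega
    rw [List.filter_congr hcong, range_filter_eq]
    have hlt : (c - a).toNat < (b - a).toNat := by omega
    simp [hlt, hc]
  · have hnil : (List.range (b - a).toNat).filter
        ((fun k => k == c) ∘ (fun k : Nat => a + (k : Int))) = [] := by
      apply List.filter_eq_nil_iff.mpr
      intro t ht
      simp only [List.mem_range] at ht
      simp only [Function.comp, beq_iff_eq]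
      omega
    rw [hnil]
    simp [hc]

-- innermost loop of A: for fixed i, j the only triple passing the sum filter has k = m - i - j
lemma inner_k (i j m : Int) (hi : 0 ≤ i) (hj : 0 ≤ j) :
    ((PySem.List.pyRange 0 (m + 1) 1).map (fun k => (i, j, k))).filter
        (fun c => c.1 + c.2.1 + c.2.2 == m) =
      if i + j ≤ m then [(i, j, m - i - j)] else [] := by
  rw [List.filter_map]
  have hcong : ∀ k ∈ PySem.List.pyRange 0 (m + 1) 1,
      ((fun c : Int × Int × Int => c.1 + c.2.1 + c.2.2 == m) ∘ (fun k => (i, j, k))) k =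
        (fun k => k == m - i - j) k := by
    intro k _
    simp only [Function.comp]
    rw [Bool.eq_iff_iff]
    simp only [beq_iff_eq]
    omega
  rw [List.filter_congr hcong, filter_eq_pyRange]
  by_cases h : i + j ≤ m
  · have h' : (0 ≤ m - i - j ∧ m - i - j < m + 1) := by omega
    simp [h, h']
    omega
  · have h' : ¬ (0 ≤ m - i - j ∧ m - i - j < m + 1) := by omega
    simp [h]
    omega

-- middle loop of A: only j ≤ m - i contributes, yielding B's composition enumeration
lemma inner_j (i m : Int) (hi : 0 ≤ i) (him : i ≤ m) :
    (PySem.List.pyRange 0 (m + 1) 1).flatMap (fun j =>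
        ((((PySem.List.pyRange 0 (m + 1) 1).map (fun k => (i, j, k))).filter
          (fun c => c.1 + c.2.1 + c.2.2 == m)).map (fun c => [1 + c.1, 1 + c.2.1, 1 + c.2.2]))) =
      (PySem.List.pyRange 0 (m - i + 1) 1).map (fun j => [1 + i, 1 + j, 1 + (m - i - j)]) := by
  rw [List.flatMap_congr (fun j hj => by
    rw [inner_k i j m hi ((PySem.List.mem_pyRange_one.1 hj).1)])]
  rw [PySem.List.pyRange_one_append 0 (m - i + 1) (m + 1) (by omega) (by omega),
    List.flatMap_append]
  have h2 : (PySem.List.pyRange (m - i + 1) (m + 1) 1).flatMap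
      (fun j => (if i + j ≤ m then [(i, j, m - i - j)] else []).map
        (fun c => [1 + c.1, 1 + c.2.1, 1 + c.2.2])) = [] := by
    apply List.flatMap_eq_nil_iff.mpr
    intro j hj
    have := PySem.List.mem_pyRange_one.1 hj
    have hne : ¬ i + j ≤ m := by omega
    simp [hne]
  rw [h2, List.append_nil]
  conv_rhs => rw [List.map_eq_flatMap]
  apply List.flatMap_congr
  intro j hj
  have := PySem.List.mem_pyRange_one.1 hj
  have hle : i + j ≤ m := by omega
  rw [if_pos hle]
  rfl

-- the per-feat_deg bodies of A and B produce the same appended block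
lemma core_eq (m : Int) :
    (generate_bin_occupations m 3).map (fun c => [1 + c.1, 1 + c.2.1, 1 + c.2.2]) =
      (PySem.List.pyRange 0 (m + 1) 1).flatMap (fun i =>
        (PySem.List.pyRange 0 (m - i + 1) 1).map (fun j => [1 + i, 1 + j, 1 + (m - i - j)])) := by
  simp only [generate_bin_occupations, List.filter_flatMap, List.map_flatMap]
  apply List.flatMap_congr
  intro i hi
  have hib := PySem.List.mem_pyRange_one.1 hi
  exact inner_j i m hib.1 (by omega)

-- ===== VERDICT (by name: the statement is the Claim_ definition above) =====
theorem find_3d_degs_spec : Claim_equal_find_3d_degs := by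
  intro deg _
  unfold Spec_find_3d_degs find_3d_degs find_3d_degs_alt
  apply PySem.List.foldl_congr_mem
  intro acc featDeg _
  simp only [PySem.List.foldl_append_singleton_eq_map]
  rw [core_eq (featDeg - 3)]
  rw [← PySem.List.foldl_append_eq_flatMap]
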